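-- pv_equiv track=rewrite | github.com/haeste/MEAPropagationAnalysis | findpeaks.py | getspeeds
-- ===== SOURCE A (Python) =====
-- def getspeeds(peaks1, peaks2):
--     comp_peaks = []
--     gap = 10
--     speeds = []
--     #look through each peak in list one
--     for peak1 in peaks1:
--         #look in list two
--         for peak2 in peaks2:
--             #if there is a value there that lies close enough to that in list one
--             if abs(peak2 - peak1) < gap:#add to comparison list and break from loop
--                 comp_peaks.append((peak1, peak2))
--                 break
--     for peaks in comp_peaks:
--         diff = peaks[0] - peaks[1]
--         speeds.append(diff)
--
--
--     return speeds
-- ===== SOURCE B (Python) =====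
-- def getspeeds(peaks1, peaks2):
--     # index peaks2 once: value -> index of its first occurrence
--     first = {}
--     for i, p in enumerate(peaks2):
--         if p not in first:
--             first[p] = i
--     speeds = []
--     for p1 in peaks1:
--         # A's match is the earliest-index element of peaks2 within distance < 10;
--         # candidates are the 19 integer values p1-9 .. p1+9: pick the one with smallest index
--         best_i = None
--         best_v = 0
--         for v in range(p1 - 9, p1 + 10):
--             i = first.get(v)
--             if i is not None and (best_i is None or i < best_i):
--                 best_i, best_v = i, v
--         if best_i is not None:
--             speeds.append(p1 - best_v)
--     return speeds
-- ===== Notes on version B (the rewrite author's own statement) =====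
-- stated objective: faster
-- what changed: B replaces A's inner linear scan of peaks2 per peak1 by a first-occurrence-index dict built once over peaks2; since the gap is the constant 10, each peak1 checks only the 19 candidate values p1-9..p1+9 and takes the one with the smallest index, removing the inner scan entirely.
import Mathlib
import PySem

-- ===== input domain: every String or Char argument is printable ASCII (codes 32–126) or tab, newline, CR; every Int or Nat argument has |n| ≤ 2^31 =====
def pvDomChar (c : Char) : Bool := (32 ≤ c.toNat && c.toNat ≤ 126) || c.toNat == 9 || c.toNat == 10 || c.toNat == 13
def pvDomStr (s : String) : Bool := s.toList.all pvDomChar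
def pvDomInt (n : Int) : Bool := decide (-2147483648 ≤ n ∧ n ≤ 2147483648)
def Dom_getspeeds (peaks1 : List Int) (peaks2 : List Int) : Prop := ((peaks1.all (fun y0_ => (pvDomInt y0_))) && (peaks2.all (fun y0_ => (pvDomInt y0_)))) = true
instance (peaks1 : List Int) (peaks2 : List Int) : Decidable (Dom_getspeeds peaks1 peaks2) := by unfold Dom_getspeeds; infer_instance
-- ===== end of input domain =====

-- B indexes peaks2 once by first-occurrence index and checks only the 19 candidate
-- values per peak, replacing A's inner linear scan (objective: faster, O(n+m) vs O(n*m)).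


-- ===== PORT A =====
-- inner 'for peak2 in peaks2: if abs(peak2-peak1) < gap: … break' — first match or none
def pvInnerA (p1 : Int) : List Int → Option Int
  | [] => none
  | p2 :: rest => if |p2 - p1| < 10 then some p2 else pvInnerA p1 rest

def getspeeds (peaks1 : List Int) (peaks2 : List Int) : List Int :=
  let comp_peaks : List (Int × Int) :=
    peaks1.foldl (fun acc p1 =>
      match pvInnerA p1 peaks2 with
      | some p2 => acc ++ [(p1, p2)]
      | none => acc) []
  comp_peaks.foldl (fun acc pk => acc ++ [pk.1 - pk.2]) []

-- ===== PORT B =====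
-- first = {}; for i, p in enumerate(peaks2): if p not in first: first[p] = i
def pvFirstDict (peaks2 : List Int) : PySem.Dict Int Int :=
  (PySem.List.enumerate peaks2 0).foldl
    (fun d ip => if d.contains ip.2 then d else d.insert ip.2 ip.1)
    PySem.Dict.empty

-- inner 'for v in range(p1-9, p1+10): …' — (best_i, best_v) as an Option pair
def pvBest (p1 : Int) (d : PySem.Dict Int Int) : Option (Int × Int) :=
  (PySem.List.pyRange (p1 - 9) (p1 + 10) 1).foldl
    (fun best v =>
      match d.get? v with
      | none => best
      | some i =>
        match best with
        | none => some (i, v)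
        | some b => if i < b.1 then some (i, v) else best)
    none

def getspeeds_alt (peaks1 : List Int) (peaks2 : List Int) : List Int :=
  let first := pvFirstDict peaks2
  peaks1.foldl (fun speeds p1 =>
    match pvBest p1 first with
    | some b => speeds ++ [p1 - b.2]
    | none => speeds) []

-- ===== PRECONDITION & SPEC =====
def Spec_getspeeds (peaks1 : List Int) (peaks2 : List Int) (out : List Int) : Prop := out = getspeeds_alt peaks1 peaks2
instance (peaks1 : List Int) (peaks2 : List Int) (out : List Int) : Decidable (Spec_getspeeds peaks1 peaks2 out) := by unfold Spec_getspeeds; infer_instance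

-- ===== CLAIM (what is proved, stated in full; the proofs are below) =====
def Claim_equal_getspeeds : Prop := ∀ (peaks1 : List Int) (peaks2 : List Int), Dom_getspeeds peaks1 peaks2 → Spec_getspeeds peaks1 peaks2 (getspeeds peaks1 peaks2)

-- ===== LEMMAS AND PROOFS =====

-- the dict B builds is first-occurrence lookup: get? v = index? peaks2 v (cast to Int)
theorem pvFirstDict_get?_gen (xs : List Int) : ∀ (s : Int) (d : PySem.Dict Int Int) (v : Int),
    ((PySem.List.enumerate xs s).foldl
      (fun d ip => if d.contains ip.2 then d else d.insert ip.2 ip.1) d).get? v =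
    match d.get? v with
    | some i => some i
    | none => (PySem.List.index? xs v).map (fun n => s + (n : Int)) := by
  induction xs with
  | nil =>
    intro s d v
    rw [PySem.List.enumerate_nil, List.foldl_nil]
    cases h : d.get? v with
    | some i => rfl
    | none => rfl
  | cons x rest ih =>
    intro s d v
    rw [PySem.List.enumerate_cons, List.foldl_cons, ih]
    by_cases hc : d.contains x = true
    · simp only [hc, if_true]
      cases hdv : d.get? v with
      | some i => rfl
      | none =>
        by_cases hvx : v = x
        · subst hvx
          rw [PySem.Dict.contains_eq_isSome_get?] at hc
          rw [hdv] at hc; simp at hc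
        · rw [PySem.List.index?_cons_of_ne rest (Ne.symm hvx)]
          cases h : PySem.List.index? rest v with
          | none => rfl
          | some n => simp; ring
    · simp only [hc, if_false, Bool.false_eq_true]
      by_cases hvx : v = x
      · subst hvx
        rw [PySem.Dict.get?_insert_self d v s]
        have hdv : d.get? v = none := by
          rw [PySem.Dict.contains_eq_isSome_get?] at hc
          cases h : d.get? v <;> simp [h] at hc ⊢
        rw [hdv, PySem.List.index?_cons_self]
        simp
      · rw [PySem.Dict.get?_insert_of_ne d s hvx]
        cases hdv : d.get? v with
        | some i => rfl
        | none =>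
          rw [PySem.List.index?_cons_of_ne rest (Ne.symm hvx)]
          cases h : PySem.List.index? rest v with
          | none => rfl
          | some n => simp; ring

theorem pvFirstDict_get? (xs : List Int) (v : Int) :
    (pvFirstDict xs).get? v = (PySem.List.index? xs v).map (fun n => (n : Int)) := by
  unfold pvFirstDict
  rw [pvFirstDict_get?_gen]
  simp [PySem.Dict.get?_empty]

-- the step of pvBest, abstracted over the lookup function
def pvStep (f : Int → Option Int) (best : Option (Int × Int)) (v : Int) : Option (Int × Int) :=
  match f v with
  | none => best
  | some i =>
    match best with
    | none => some (i, v)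
    | some b => if i < b.1 then some (i, v) else best

-- once the accumulator holds index 0 and all lookups are ≥ 0, it never changes
theorem pvStep_keep_zero (f : Int → Option Int) (x : Int)
    (hf : ∀ v i, f v = some i → 0 ≤ i) :
    ∀ (r : List Int), r.foldl (pvStep f) (some (0, x)) = some (0, x) := by
  intro r
  induction r with
  | nil => rfl
  | cons v r' ih =>
    rw [List.foldl_cons]
    have : pvStep f (some (0, x)) v = some (0, x) := by
      unfold pvStep
      cases hv : f v with
      | none => rfl
      | some i =>
        have := hf v i hv
        simp only []
        have : ¬ i < (0 : Int) := by omega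
        simp [this]
    rw [this, ih]

-- if x ∈ r has lookup 0 and every other lookup is ≥ 1, the fold returns (0, x)
theorem pvBest_hits_zero (f : Int → Option Int) (x : Int)
    (hx : f x = some 0)
    (hpos : ∀ v, v ≠ x → ∀ i, f v = some i → 1 ≤ i) :
    ∀ (r : List Int) (acc : Option (Int × Int)),
      x ∈ r →
      (acc = none ∨ ∃ b, acc = some b ∧ 1 ≤ b.1) →
      r.foldl (pvStep f) acc = some (0, x) := by
  intro r
  induction r with
  | nil => intro acc h; simp at h
  | cons v r' ih =>
    intro acc hmem hacc
    have hf0 : ∀ w i, f w = some i → 0 ≤ i := by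
      intro w i hw
      by_cases hwx : w = x
      · subst hwx; rw [hx] at hw; injection hw with h; omega
      · have := hpos w hwx i hw; omega
    rw [List.foldl_cons]
    by_cases hvx : v = x
    · subst hvx
      have hstep : pvStep f acc v = some (0, v) := by
        unfold pvStep
        rw [hx]
        rcases hacc with h | ⟨b, hb, hb1⟩
        · subst h; rfl
        · subst hb; simp only []
          have : (0 : Int) < b.1 := by omega
          simp [this]
      rw [hstep]
      exact pvStep_keep_zero f v hf0 r'
    · have hmem' : x ∈ r' := by
        cases hmem with
        | head => exact absurd rfl hvx
        | tail _ h => exact h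
      apply ih _ hmem'
      unfold pvStep
      cases hv : f v with
      | none => exact hacc
      | some i =>
        have hi : 1 ≤ i := hpos v hvx i hv
        rcases hacc with h | ⟨b, hb, hb1⟩
        · subst h; right; exact ⟨(i, v), rfl, hi⟩
        · subst hb; simp only []
          by_cases hlt : i < b.1
          · simp only [hlt, if_true]; right; exact ⟨(i, v), rfl, hi⟩
          · simp only [hlt, if_false]; right; exact ⟨b, rfl, hb1⟩

-- shifting every lookup by +1 shifts the fold's index component by +1, value unchanged
theorem pvBest_shift (f g : Int → Option Int) :
    ∀ (r : List Int), (∀ v ∈ r, f v = (g v).map (· + 1)) →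
    ∀ (acc : Option (Int × Int)),
      r.foldl (pvStep f) (acc.map (fun b => (b.1 + 1, b.2))) =
      (r.foldl (pvStep g) acc).map (fun b => (b.1 + 1, b.2)) := by
  intro r
  induction r with
  | nil => intro _ acc; rfl
  | cons v r' ih =>
    intro hshift acc
    rw [List.foldl_cons, List.foldl_cons]
    have hv := hshift v (List.mem_cons_self)
    have hstep : pvStep f (acc.map (fun b => (b.1 + 1, b.2))) v =
        (pvStep g acc v).map (fun b => (b.1 + 1, b.2)) := by
      unfold pvStep
      rw [hv]
      cases hg : g v with
      | none => rfl
      | some i =>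
        cases acc with
        | none => rfl
        | some b =>
          simp only [Option.map_some]
          by_cases hlt : i < b.1
          · have : i + 1 < b.1 + 1 := by omega
            simp [hlt, this]
          · have : ¬ i + 1 < b.1 + 1 := by omega
            simp [hlt, this]
    rw [hstep]
    exact ih (fun w hw => hshift w (List.mem_cons_of_mem v hw)) _

-- if every lookup over r is none the fold keeps its accumulator
theorem pvBest_all_none (f : Int → Option Int) :
    ∀ (r : List Int), (∀ v ∈ r, f v = none) → ∀ acc, r.foldl (pvStep f) acc = acc := by
  intro r
  induction r with
  | nil => intro _ acc; rfl
  | cons v r' ih =>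
    intro h acc
    rw [List.foldl_cons]
    have : pvStep f acc v = acc := by unfold pvStep; rw [h v List.mem_cons_self]
    rw [this]
    exact ih (fun w hw => h w (List.mem_cons_of_mem v hw)) acc

-- KEY: B's best candidate has the same peak value as A's first match
theorem pvBest_eq_innerA (p1 : Int) (xs : List Int) :
    (pvBest p1 (pvFirstDict xs)).map (·.2) = pvInnerA p1 xs := by
  have hb : pvBest p1 (pvFirstDict xs) =
      (PySem.List.pyRange (p1 - 9) (p1 + 10) 1).foldl
        (pvStep (fun v => (PySem.List.index? xs v).map (fun n => (n : Int)))) none := by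
    unfold pvBest pvStep
    congr 1
    funext best v
    rw [pvFirstDict_get?]
  rw [hb]; clear hb
  induction xs with
  | nil =>
    rw [pvBest_all_none (fun v => (PySem.List.index? ([] : List Int) v).map (fun n => (n : Int))) _ (fun v _ => rfl) none]
    rfl
  | cons x rest ih =>
    set f := fun v => (PySem.List.index? (x :: rest) v).map (fun n => (n : Int)) with hf
    set g := fun v => (PySem.List.index? rest v).map (fun n => (n : Int)) with hg
    by_cases hin : |x - p1| < 10
    · -- x is in the window: lookup of x is 0, others ≥ 1; fold returns (0, x)
      have hx : f x = some 0 := by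
        show (PySem.List.index? (x :: rest) x).map (fun n => (n : Int)) = some 0
        rw [PySem.List.index?_cons_self]; rfl
      have hpos : ∀ v, v ≠ x → ∀ i, f v = some i → 1 ≤ i := by
        intro v hvx i hv
        simp only [hf] at hv
        rw [PySem.List.index?_cons_of_ne rest (Ne.symm hvx)] at hv
        cases h : PySem.List.index? rest v with
        | none => rw [h] at hv; simp at hv
        | some n => rw [h] at hv; simp at hv; omega
      have hin' : -10 < x - p1 ∧ x - p1 < 10 := abs_lt.mp hin
      have hmem : x ∈ PySem.List.pyRange (p1 - 9) (p1 + 10) 1 := by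
        rw [PySem.List.mem_pyRange_one]; omega
      rw [pvBest_hits_zero f x hx hpos _ none hmem (Or.inl rfl)]
      have : pvInnerA p1 (x :: rest) = some x := by simp only [pvInnerA, if_pos hin]
      rw [this]; rfl
    · -- x outside the window: all lookups in the window shift by +1 relative to rest
      have hshift : ∀ v ∈ PySem.List.pyRange (p1 - 9) (p1 + 10) 1,
          f v = (g v).map (· + 1) := by
        intro v hv
        rw [PySem.List.mem_pyRange_one] at hv
        have hin' : ¬(-10 < x - p1 ∧ x - p1 < 10) := fun h => hin (abs_lt.mpr h)
        have hvx : x ≠ v := by intro h; subst h; omega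
        simp only [hf, hg]
        rw [PySem.List.index?_cons_of_ne rest hvx]
        cases h : PySem.List.index? rest v with
        | none => rfl
        | some n => simp
      have := pvBest_shift f g _ hshift none
      simp only [Option.map_none] at this
      rw [this]
      have hA : pvInnerA p1 (x :: rest) = pvInnerA p1 rest := by
        simp only [pvInnerA, if_neg hin]
      rw [hA, ← ih]
      cases (PySem.List.pyRange (p1 - 9) (p1 + 10) 1).foldl (pvStep g) none <;> rfl

-- the outer loops agree, accumulator-generalized
theorem pv_outer (peaks2 : List Int) (peaks1 : List Int) :
    ∀ (acc : List (Int × Int)),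
      ((peaks1.foldl (fun acc p1 =>
          match pvInnerA p1 peaks2 with
          | some p2 => acc ++ [(p1, p2)]
          | none => acc) acc).map (fun pk => pk.1 - pk.2)) =
      peaks1.foldl (fun speeds p1 =>
          match pvBest p1 (pvFirstDict peaks2) with
          | some b => speeds ++ [p1 - b.2]
          | none => speeds) (acc.map (fun pk => pk.1 - pk.2)) := by
  induction peaks1 with
  | nil => intro acc; rfl
  | cons p1 rest ih =>
    intro acc
    rw [List.foldl_cons, List.foldl_cons]
    have hk := pvBest_eq_innerA p1 peaks2
    cases hbest : pvBest p1 (pvFirstDict peaks2) with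
    | none =>
      rw [hbest] at hk
      simp only [Option.map_none] at hk
      rw [← hk]
      exact ih acc
    | some b =>
      rw [hbest] at hk
      simp only [Option.map_some] at hk
      rw [← hk]
      simp only []
      rw [ih (acc ++ [(p1, b.2)])]
      simp

-- ===== VERDICT (by name: the statement is the Claim_ definition above) =====
theorem getspeeds_spec : Claim_equal_getspeeds := by
  intro peaks1 peaks2 _
  unfold Spec_getspeeds getspeeds getspeeds_alt
  simp only []
  rw [PySem.List.foldl_append_singleton_eq_map]
  exact pv_outer peaks2 peaks1 []
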